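-- pv_equiv track=rewrite | github.com/fjelltopp/unaids_etl | adr_dhis2_geodata_etl.py | __flip_coordinates
-- ===== SOURCE A (Python) =====
-- def __flip_coordinates(cords):
--     # to be used if you want to flip coords in nested collection
--     # e.g. polygon: [[[12.0, -2], [12.0, -2.5], ... ], [[12,3], [...]]]
--     if type(cords) == list and len(cords):
--         nested_list = any([type(item) == list for item in cords])
--         if nested_list:
--             for item in cords:
--                 __flip_coordinates(item)
--         else:
--             swap = cords[0]
--             cords[0] = cords[1]
--             cords[1] = swap
--     return cords
-- ===== SOURCE B (Python) =====
-- def __flip_coordinates(cords):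
--     # Pure rebuild via nested comprehensions (no in-place mutation, unlike A,
--     # whose swap mutates the leaves; equivalence is about the return value).
--     return [[leaf if len(leaf) < 2 else [leaf[1], leaf[0]] + leaf[2:]
--              for leaf in mid]
--             for mid in cords]
-- ===== Notes on version B (the rewrite author's own statement) =====
-- stated objective: simpler
-- what changed: A's recursive in-place swap with type/any() checks is replaced by a pure nested-comprehension rebuild that swaps the first two entries of each leaf; B mutates nothing and returns a fresh structure (return value identical).
import Mathlib
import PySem

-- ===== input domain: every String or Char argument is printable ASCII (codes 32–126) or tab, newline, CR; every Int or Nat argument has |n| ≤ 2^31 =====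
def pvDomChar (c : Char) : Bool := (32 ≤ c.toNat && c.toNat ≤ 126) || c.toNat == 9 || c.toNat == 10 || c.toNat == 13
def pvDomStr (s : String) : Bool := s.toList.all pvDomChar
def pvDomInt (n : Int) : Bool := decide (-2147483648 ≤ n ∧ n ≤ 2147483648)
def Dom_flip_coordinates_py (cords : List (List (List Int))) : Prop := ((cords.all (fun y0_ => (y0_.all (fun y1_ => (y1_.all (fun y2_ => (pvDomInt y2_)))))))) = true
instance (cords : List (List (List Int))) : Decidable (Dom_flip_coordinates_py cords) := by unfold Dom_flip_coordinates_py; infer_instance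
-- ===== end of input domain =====

-- B differs from A in side effects only: A swaps leaf entries IN PLACE and returns the same
-- object, B returns a fresh structure; the equivalence proved here is about the return value.

-- ===== PORT A =====
-- Python recursion specialised to the declared 3-level type: at the two outer levels every
-- item is a list, so `nested_list = any(type(item) == list for item in cords)` is true exactly
-- when the level is non-empty; at a leaf the items are ints, so the swap branch runs.
def pvFlipLeafA (l : List Int) : List Int :=
  if l.length ≠ 0 then
    -- swap = l[0]; l[0] = l[1]; l[1] = swap
    match PySem.List.pyGet? l 0, PySem.List.pyGet? l 1 with
    | some a, some b => b :: a :: l.drop 2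
    | _, _ => l      -- Python raises IndexError here (leaf of length 1); outside Pre_
  else l

def pvFlipMidA (m : List (List Int)) : List (List Int) :=
  if m.length ≠ 0 then m.map pvFlipLeafA else m

def flip_coordinates_py (cords : List (List (List Int))) : List (List (List Int)) :=
  if cords.length ≠ 0 then cords.map pvFlipMidA else cords

-- ===== PORT B =====
def flip_coordinates_py_alt (cords : List (List (List Int))) : List (List (List Int)) :=
  cords.map (fun mid =>
    mid.map (fun leaf =>
      if leaf.length < 2 then leaf
      else leaf.getD 1 0 :: leaf.getD 0 0 :: leaf.drop 2))

-- ===== PRECONDITION & SPEC =====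
-- Pre_ excludes inputs containing a leaf of length exactly 1, on which Python A raises IndexError.
def Pre_flip_coordinates_py (cords : List (List (List Int))) : Prop :=
  ∀ mid ∈ cords, ∀ leaf ∈ mid, leaf.length ≠ 1
instance (cords : List (List (List Int))) : Decidable (Pre_flip_coordinates_py cords) := by unfold Pre_flip_coordinates_py; infer_instance

def pvWitness_flip_coordinates_py : List (List (List Int)) := [[[12, -2], [12, -3]], [[]], []]

def Spec_flip_coordinates_py (cords : List (List (List Int))) (out : List (List (List Int))) : Prop := out = flip_coordinates_py_alt cords
instance (cords : List (List (List Int))) (out : List (List (List Int))) : Decidable (Spec_flip_coordinates_py cords out) := by unfold Spec_flip_coordinates_py; infer_instance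

-- ===== CLAIM (what is proved, stated in full; the proofs are below) =====
def Claim_equal_flip_coordinates_py : Prop := ∀ (cords : List (List (List Int))), Dom_flip_coordinates_py cords → Pre_flip_coordinates_py cords → Spec_flip_coordinates_py cords (flip_coordinates_py cords)

-- ===== LEMMAS AND PROOFS =====
lemma pvFlipLeaf_eq (l : List Int) (h : l.length ≠ 1) :
    pvFlipLeafA l = if l.length < 2 then l else l.getD 1 0 :: l.getD 0 0 :: l.drop 2 := by
  match l with
  | [] => simp [pvFlipLeafA]
  | [a] => exact absurd rfl h
  | a :: b :: t =>
    have h0 : PySem.List.pyGet? (a :: b :: t) 0 = some a := by simp [pysem]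
    simp [pvFlipLeafA, h0]

-- ===== VERDICT (by name: the statement is the Claim_ definition above) =====
theorem flip_coordinates_py_spec : Claim_equal_flip_coordinates_py := by
  intro cords _ hpre
  unfold Spec_flip_coordinates_py flip_coordinates_py flip_coordinates_py_alt
  by_cases hc : cords.length ≠ 0
  · rw [if_pos hc]
    apply List.map_congr_left
    intro mid hmid
    unfold pvFlipMidA
    by_cases hm : mid.length ≠ 0
    · rw [if_pos hm]
      apply List.map_congr_left
      intro leaf hleaf
      exact pvFlipLeaf_eq leaf (hpre mid hmid leaf hleaf)
    · rw [not_ne_iff, List.length_eq_zero_iff] at hm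
      subst hm
      simp
  · rw [not_ne_iff, List.length_eq_zero_iff] at hc
    subst hc
    simp
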